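-- pv_equiv track=rewrite | github.com/libharmo/libharmo.github.io | code/py/icfctclb/subEvaluationCode.py | icfcSize
-- ===== SOURCE A (Python) =====
-- def icfcSize(m_dict):
--     cnt = 0
--     cnt2 = 0
--     for proj in m_dict:
--         cnt2+=1
--         for lib in m_dict[proj]:
--             cnt+=1
--     return cnt2,cnt
-- ===== SOURCE B (Python) =====
-- def icfcSize(m_dict):
--     items = list(m_dict.items())
--
--     def go(items):
--         n = len(items)
--         if n == 0:
--             return 0, 0
--         if n == 1:
--             return 1, len(items[0][1])
--         p1, l1 = go(items[:n // 2])
--         p2, l2 = go(items[n // 2:])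
--         return p1 + p2, l1 + l2
--
--     return go(items)
-- ===== Notes on version B (the rewrite author's own statement) =====
-- stated objective: alternative
-- what changed: B counts by divide and conquer: it splits the item list in halves, recurses, and adds the (project, library) pair counts, never running A's nested element-by-element loops.
import Mathlib
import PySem

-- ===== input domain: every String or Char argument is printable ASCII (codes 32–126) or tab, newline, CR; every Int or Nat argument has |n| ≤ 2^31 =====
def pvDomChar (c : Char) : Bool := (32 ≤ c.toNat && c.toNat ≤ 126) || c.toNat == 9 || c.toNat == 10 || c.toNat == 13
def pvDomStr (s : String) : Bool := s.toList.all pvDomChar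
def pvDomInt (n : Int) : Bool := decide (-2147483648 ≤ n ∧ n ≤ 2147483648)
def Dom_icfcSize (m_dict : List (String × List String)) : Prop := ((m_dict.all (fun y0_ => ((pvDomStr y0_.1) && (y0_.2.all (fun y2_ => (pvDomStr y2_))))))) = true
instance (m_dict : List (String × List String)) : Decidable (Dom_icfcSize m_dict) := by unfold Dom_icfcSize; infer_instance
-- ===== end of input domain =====

-- B counts by divide-and-conquer over the item list (halving recursion) instead of A's nested loops (objective: alternative).


-- ===== PORT A =====
-- for proj in m_dict: cnt2 += 1; for lib in m_dict[proj]: cnt += 1; return cnt2, cnt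
def icfcSize (m_dict : List (String × List String)) : Int × Int :=
  let d := PySem.Dict.mk m_dict
  let s := d.keys.foldl
    (fun (s : Int × Int) proj =>
      let cnt2 := s.2 + 1
      let cnt := (d.getD proj []).foldl (fun (c : Int) _ => c + 1) s.1
      (cnt, cnt2)) (0, 0)
  (s.2, s.1)

-- ===== PORT B =====
-- go(items): n = len(items); if n == 0: (0,0); if n == 1: (1, len(items[0][1]));
-- else split at n//2, recurse on both halves, add componentwise.
-- items[:n//2] / items[n//2:] are ported as take/drop (exact for these non-negative in-range slices);
-- items[0] on the singleton branch is ported as headD (exact there since n = 1).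
-- fuel = items.length bounds the recursion depth (a totality guard only; never reached 0 since
-- both halves are strictly shorter than the list, see icfcGo_eq).
def icfcGo (fuel : Nat) (items : List (String × List String)) : Int × Int :=
  match fuel with
  | 0 => (0, 0)
  | fuel + 1 =>
    let n := items.length
    if n = 0 then (0, 0)
    else if n = 1 then (1, (((items.headD ("", [])).2.length : Int)))
    else
      let l := icfcGo fuel (items.take (n / 2))
      let r := icfcGo fuel (items.drop (n / 2))
      (l.1 + r.1, l.2 + r.2)

def icfcSize_alt (m_dict : List (String × List String)) : Int × Int :=
  icfcGo m_dict.length m_dict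

-- ===== PRECONDITION & SPEC =====
-- Pre_ requires distinct keys: a Python dict cannot hold duplicate keys, so an association
-- list with repeated keys represents no dict input A could ever receive.
def Pre_icfcSize (m_dict : List (String × List String)) : Prop :=
  (m_dict.map Prod.fst).Nodup
instance (m_dict : List (String × List String)) : Decidable (Pre_icfcSize m_dict) := by unfold Pre_icfcSize; infer_instance

def pvWitness_icfcSize : (List (String × List String)) := [("a", ["x", "y"]), ("b", ["z"])]

def Spec_icfcSize (m_dict : List (String × List String)) (out : Int × Int) : Prop := out = icfcSize_alt m_dict
instance (m_dict : List (String × List String)) (out : Int × Int) : Decidable (Spec_icfcSize m_dict out) := by unfold Spec_icfcSize; infer_instance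

-- ===== CLAIM (what is proved, stated in full; the proofs are below) =====
def Claim_equal_icfcSize : Prop := ∀ (m_dict : List (String × List String)), Dom_icfcSize m_dict → Pre_icfcSize m_dict → Spec_icfcSize m_dict (icfcSize m_dict)

-- ===== LEMMAS AND PROOFS =====

-- the inner 'for lib in …: cnt += 1' loop just adds the length
theorem icfc_inner (l : List String) : ∀ (c : Int),
    l.foldl (fun (c : Int) _ => c + 1) c = c + l.length := by
  induction l with
  | nil => intro c; simp
  | cons x xs ih => intro c; simp [List.foldl, ih]; ring

-- A's outer loop, characterised for nodup keys
theorem icfc_loop (m : List (String × List String))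
    (hnd : (m.map Prod.fst).Nodup) : ∀ (s : Int × Int),
    ((PySem.Dict.mk m).keys.foldl
      (fun (s : Int × Int) proj =>
        (((PySem.Dict.mk m).getD proj []).foldl (fun (c : Int) _ => c + 1) s.1, s.2 + 1)) s)
    = (s.1 + (m.map (fun kv => (kv.2.length : Int))).sum, s.2 + m.length) := by
  induction m with
  | nil => intro s; simp [PySem.Dict.keys]
  | cons kv tl ih =>
    obtain ⟨k, v⟩ := kv
    intro s
    simp only [List.map_cons, List.nodup_cons] at hnd
    obtain ⟨hk, hnd'⟩ := hnd
    have hkeys : (PySem.Dict.mk ((k, v) :: tl)).keys = k :: tl.map Prod.fst := by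
      simp [PySem.Dict.keys]
    rw [hkeys]
    simp only [List.foldl_cons]
    have hheadD : (PySem.Dict.mk ((k, v) :: tl)).getD k [] = v := by
      simp [PySem.Dict.getD_eq_get?_getD, PySem.Dict.get?_mk_cons]
    rw [hheadD, icfc_inner]
    have hcongr : (tl.map Prod.fst).foldl
        (fun (s : Int × Int) proj =>
          (((PySem.Dict.mk ((k, v) :: tl)).getD proj []).foldl (fun (c : Int) _ => c + 1) s.1, s.2 + 1))
        (s.1 + ↑v.length, s.2 + 1)
      = (tl.map Prod.fst).foldl
        (fun (s : Int × Int) proj =>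
          (((PySem.Dict.mk tl).getD proj []).foldl (fun (c : Int) _ => c + 1) s.1, s.2 + 1))
        (s.1 + ↑v.length, s.2 + 1) := by
      apply PySem.List.foldl_congr_mem
      intro acc x hx
      have hxk : (k == x) = false := beq_eq_false_iff_ne.mpr (by rintro rfl; exact hk hx)
      have : (PySem.Dict.mk ((k, v) :: tl)).getD x [] = (PySem.Dict.mk tl).getD x [] := by
        simp [PySem.Dict.getD_eq_get?_getD, PySem.Dict.get?_mk_cons, hxk]
      rw [this]
    rw [hcongr]
    have hkeys' : (PySem.Dict.mk tl).keys = tl.map Prod.fst := by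
      simp [PySem.Dict.keys]
    rw [← hkeys', ih hnd' (s.1 + ↑v.length, s.2 + 1)]
    simp
    constructor <;> ring

-- B's divide-and-conquer returns (length, sum of per-project lengths) whenever fuel suffices
theorem icfcGo_eq (fuel : Nat) : ∀ (items : List (String × List String)), items.length ≤ fuel →
    icfcGo fuel items = ((items.length : Int), (items.map (fun kv => (kv.2.length : Int))).sum) := by
  induction fuel with
  | zero =>
    intro items h
    have : items = [] := List.length_eq_zero_iff.mp (Nat.le_zero.mp h)
    subst this; simp [icfcGo]
  | succ fuel ih =>
    intro items h
    rw [icfcGo]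
    by_cases h0 : items.length = 0
    · have : items = [] := List.length_eq_zero_iff.mp h0
      subst this; simp
    · by_cases h1 : items.length = 1
      · obtain ⟨x, rfl⟩ := List.length_eq_one_iff.mp h1
        simp
      · simp only [if_neg h0, if_neg h1]
        rw [ih (items.take (items.length / 2)) (by simp [List.length_take]; omega),
            ih (items.drop (items.length / 2)) (by simp [List.length_drop]; omega)]
        have hsplit : items.take (items.length / 2) ++ items.drop (items.length / 2) = items :=
          List.take_append_drop _ _
        refine Prod.ext ?_ ?_
        · simp only [List.length_take, List.length_drop]
          push_cast
          omega
        · conv_rhs => rw [← hsplit]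
          simp

-- ===== VERDICT (by name: the statement is the Claim_ definition above) =====
theorem icfcSize_spec : Claim_equal_icfcSize := by
  intro m _ hpre
  simp only [Spec_icfcSize, icfcSize, icfcSize_alt, icfc_loop m hpre, icfcGo_eq m.length m le_rfl]
  simp
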